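-- pv_equiv track=rewrite | github.com/Bikszxc/Python-Pratice | generators practice/first_letter_tracker.py | first_letter_tracker
-- ===== SOURCE A (Python) =====
-- def first_letter_tracker(sentence):
--     letters = set()
--     for word in sentence.split():
--         first_letter = word[0].upper()
--         if first_letter not in letters:
--             yield first_letter
--             letters.add(first_letter)
--         continue
-- ===== SOURCE B (Python) =====
-- def first_letter_tracker(sentence):
--     # Pass 1: character-level state machine (no split()): a char starts a word
--     # iff it is non-whitespace and the previous char was whitespace/start.
--     firsts = []
--     prev_space = True
--     for ch in sentence:
--         if ch.isspace():
--             prev_space = True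
--         else:
--             if prev_space:
--                 firsts.append(ch.upper())
--             prev_space = False
--     # Pass 2: emit each letter only if it did not occur earlier in firsts.
--     for i in range(len(firsts)):
--         if firsts[i] not in firsts[:i]:
--             yield firsts[i]
-- ===== Notes on version B (the rewrite author's own statement) =====
-- stated objective: alternative
-- what changed: B never calls split() or keeps a seen-set: a character-level state machine (previous-char-was-space flag) collects word-starting letters in one pass over the raw characters, then a second prefix-scan pass emits each letter only if absent from the already-processed prefix.
import Mathlib
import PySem

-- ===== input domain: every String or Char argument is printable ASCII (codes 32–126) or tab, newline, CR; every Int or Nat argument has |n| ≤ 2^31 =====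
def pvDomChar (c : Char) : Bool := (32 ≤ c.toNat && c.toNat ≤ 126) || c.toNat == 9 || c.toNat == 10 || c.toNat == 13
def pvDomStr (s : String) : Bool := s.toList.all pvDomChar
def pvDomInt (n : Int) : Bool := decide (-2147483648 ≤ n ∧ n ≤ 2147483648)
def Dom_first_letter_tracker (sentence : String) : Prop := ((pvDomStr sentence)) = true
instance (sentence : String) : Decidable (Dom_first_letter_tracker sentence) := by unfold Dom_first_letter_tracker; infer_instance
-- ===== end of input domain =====

-- B replaces A's split()-and-seen-set generator by a character-level state machine collecting
-- word-starting letters plus a prefix-scan dedup pass; alternative decomposition, same values.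

-- ===== PORT A =====
-- A: for word in sentence.split(): first_letter = word[0].upper(); if not seen: yield, add.
-- word[0] cannot raise (split() yields no empty words), so pyGetD with a dummy default is exact here.
def first_letter_tracker (sentence : String) : List String :=
  (PySem.Str.split₀ sentence).foldl
    (fun (st : PySem.Set String × List String) word =>
      let first_letter := String.ofList [PySem.Chars.upperChar (PySem.List.pyGetD word.toList 0 ' ')]
      if PySem.Set.contains st.1 first_letter = false then
        (PySem.Set.add st.1 first_letter, st.2 ++ [first_letter])
      else st)
    (PySem.Set.empty, [])
  |>.2

-- ===== PORT B =====
-- B pass 2: 'for i in range(len(firsts)): if firsts[i] not in firsts[:i]: yield firsts[i]',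
-- written as structural recursion carrying the processed prefix firsts[:i].
def pvEmit : List String → List String → List String
  | _, [] => []
  | pre, x :: xs => if x ∈ pre then pvEmit (pre ++ [x]) xs else x :: pvEmit (pre ++ [x]) xs

-- B pass 1: char scan with the prev_space flag, appending upper-cased word-starting chars.
def first_letter_tracker_alt (sentence : String) : List String :=
  let firsts :=
    (sentence.toList.foldl
      (fun (st : Bool × List String) ch =>
        if PySem.Chars.isspace ch then (true, st.2)
        else (false, if st.1 then st.2 ++ [String.ofList [PySem.Chars.upperChar ch]] else st.2))
      (true, [])).2
  pvEmit [] firsts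

-- ===== PRECONDITION & SPEC =====
def Spec_first_letter_tracker (sentence : String) (out : List String) : Prop := out = first_letter_tracker_alt sentence
instance (sentence : String) (out : List String) : Decidable (Spec_first_letter_tracker sentence out) := by unfold Spec_first_letter_tracker; infer_instance

-- ===== CLAIM (what is proved, stated in full; the proofs are below) =====
def Claim_equal_first_letter_tracker : Prop := ∀ (sentence : String), Dom_first_letter_tracker sentence → Spec_first_letter_tracker sentence (first_letter_tracker sentence)

-- ===== LEMMAS AND PROOFS =====

-- the word-starting letters of a char list, given the prev-is-space flag (pure form of B's pass 1)
def pvScan : List Char → Bool → List String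
  | [], _ => []
  | c :: cs, prev =>
    if PySem.Chars.isspace c then pvScan cs true
    else (if prev then [String.ofList [PySem.Chars.upperChar c]] else []) ++ pvScan cs false

-- B's pass-1 foldl accumulates exactly pvScan
theorem pv_scan_foldl : ∀ (cs : List Char) (prev : Bool) (acc : List String),
    (cs.foldl
      (fun (st : Bool × List String) ch =>
        if PySem.Chars.isspace ch then (true, st.2)
        else (false, if st.1 then st.2 ++ [String.ofList [PySem.Chars.upperChar ch]] else st.2))
      (prev, acc)).2 = acc ++ pvScan cs prev := by
  intro cs
  induction cs with
  | nil => intro prev acc; simp [pvScan]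
  | cons c cs ih =>
    intro prev acc
    simp only [List.foldl_cons, pvScan]
    by_cases hs : PySem.Chars.isspace c = true
    · simp [hs, ih]
    · by_cases hp : prev = true
      · simp [hs, hp, ih]
      · simp only [Bool.not_eq_true] at hp
        simp [hs, hp, ih]

-- A's key applied to a char-list word
def pvKey (w : List Char) : String := String.ofList [PySem.Chars.upperChar (w.getD 0 ' ')]

-- first letters of split₀'s words = pvScan of the raw characters
theorem pv_go_map : ∀ (rest cur : List Char) (acc : List (List Char)),
    (PySem.Chars.split₀.go rest cur acc).map pvKey =
      acc.reverse.map pvKey ++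
        (if cur.isEmpty then pvScan rest true else pvKey cur.reverse :: pvScan rest false) := by
  intro rest
  induction rest with
  | nil =>
    intro cur acc
    by_cases hc : cur.isEmpty = true
    · simp [PySem.Chars.split₀.go, hc, pvScan]
    · simp [PySem.Chars.split₀.go, hc, pvScan]
  | cons c cs ih =>
    intro cur acc
    by_cases hs : PySem.Chars.isspace c = true
    · by_cases hc : cur.isEmpty = true
      · simp [PySem.Chars.split₀.go, hs, hc, ih, pvScan]
      · simp [PySem.Chars.split₀.go, hs, hc, ih, pvScan]
    · by_cases hc : cur.isEmpty = true
      · have hcur : cur = [] := List.isEmpty_iff.mp hc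
        subst hcur
        simp [PySem.Chars.split₀.go, hs, ih, pvScan, pvKey]
      · have hcur : cur ≠ [] := by simpa using hc
        have hlen : 0 < cur.reverse.length := by
          simpa using List.length_pos_iff.mpr hcur
        simp only [PySem.Chars.split₀.go, hs, hc, Bool.false_eq_true, if_false]
        rw [ih]
        simp [pvScan, hs, pvKey]
        simp [List.getElem_append_left hlen, List.getElem?_eq_getElem hlen]

-- A's seen-set loop equals folding PySem.Set.add over the mapped keys (both components)
theorem pv_loop_eq (key : String → String) :
    ∀ (ys : List String) (s : List String),
      ys.foldl
        (fun (st : PySem.Set String × List String) word =>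
          let f := key word
          if PySem.Set.contains st.1 f = false then (PySem.Set.add st.1 f, st.2 ++ [f]) else st)
        (s, s)
      = ((ys.map key).foldl PySem.Set.add s, (ys.map key).foldl PySem.Set.add s) := by
  intro ys
  induction ys with
  | nil => intro s; simp
  | cons w ws ih =>
    intro s
    simp only [List.foldl_cons, List.map_cons]
    by_cases h : PySem.Set.contains s (key w) = false
    · rw [if_pos h]
      have hnot : key w ∉ s := by simpa using h
      have hadd : PySem.Set.add s (key w) = s ++ [key w] := by
        simp [PySem.Set.add, hnot]
      rw [hadd]
      exact ih (s ++ [key w])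
    · rw [if_neg h]
      have hmem : key w ∈ s := by
        by_contra hc
        exact h (by simpa using hc)
      have hadd : PySem.Set.add s (key w) = s := by
        simp [PySem.Set.add, hmem]
      rw [hadd]
      exact ih s

-- B's prefix-scan emission computes the Set.add fold, given seen-set and prefix agree on membership
theorem pv_emit_eq : ∀ (xs pre s : List String), (∀ x, x ∈ s ↔ x ∈ pre) →
    xs.foldl PySem.Set.add s = s ++ pvEmit pre xs := by
  intro xs
  induction xs with
  | nil => intro pre s _; simp [pvEmit]
  | cons x xs ih =>
    intro pre s h
    simp only [List.foldl_cons, pvEmit]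
    by_cases hx : x ∈ pre
    · have hxs : x ∈ s := (h x).mpr hx
      have hadd : PySem.Set.add s x = s := by simp [PySem.Set.add, hxs]
      rw [if_pos hx, hadd]
      exact ih (pre ++ [x]) s (fun y => by
        constructor
        · intro hy; simp [List.mem_append, (h y).mp hy]
        · intro hy
          rcases List.mem_append.mp hy with hy | hy
          · exact (h y).mpr hy
          · simp at hy; subst hy; exact hxs)
    · have hxs : x ∉ s := fun hc => hx ((h x).mp hc)
      have hadd : PySem.Set.add s x = s ++ [x] := by simp [PySem.Set.add, hxs]
      rw [if_neg hx, hadd]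
      rw [ih (pre ++ [x]) (s ++ [x]) (fun y => by simp [List.mem_append, h y])]
      simp

-- ===== VERDICT (by name: the statement is the Claim_ definition above) =====
theorem first_letter_tracker_spec : Claim_equal_first_letter_tracker := by
  intro sentence _
  unfold Spec_first_letter_tracker first_letter_tracker first_letter_tracker_alt
  rw [show (PySem.Set.empty : PySem.Set String) = [] from rfl,
     pv_loop_eq (fun word => String.ofList [PySem.Chars.upperChar (PySem.List.pyGetD word.toList 0 ' ')])
        (PySem.Str.split₀ sentence) []]
  have hmap : (PySem.Str.split₀ sentence).map
      (fun word => String.ofList [PySem.Chars.upperChar (PySem.List.pyGetD word.toList 0 ' ')])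
      = pvScan sentence.toList true := by
    rw [show PySem.Str.split₀ sentence
        = (PySem.Chars.split₀ sentence.toList).map String.ofList from rfl]
    rw [List.map_map]
    have : (fun word => String.ofList [PySem.Chars.upperChar (PySem.List.pyGetD word.toList 0 ' ')])
        ∘ String.ofList = pvKey := by
      funext w
      simp [pvKey, PySem.List.pyGetD_zero]
    rw [this, show PySem.Chars.split₀ sentence.toList
        = PySem.Chars.split₀.go sentence.toList [] [] from rfl]
    simpa using pv_go_map sentence.toList [] []
  rw [hmap, pv_scan_foldl sentence.toList true []]
  rw [pv_emit_eq (pvScan sentence.toList true) [] [] (fun x => Iff.rfl)]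
  simp
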